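-- pv_equiv track=rewrite | github.com/AnhTran1610/codility | monitors_delivery/monitors_delivery.py | solution
-- ===== SOURCE A (Python) =====
-- def solution(D, C, P):
--     # Create a list of objects
--     monitors = [{'distance': D[i], 'monitor': C[i]} for i in range(len(D))]
--
--     # Sort the list based on distance and monitor cost
--     sorted_monitors = sorted(monitors, key=lambda x: (x['distance'], x['monitor']))
--
--     # Iterate through the sorted list
--     counter = 0
--     for i in range(len(sorted_monitors)):
--         if P >= sorted_monitors[i]['monitor']:
--             P -= sorted_monitors[i]['monitor']
--             counter += 1
--         else:
--             return counter
--
--     return counter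
-- ===== SOURCE B (Python) =====
-- def solution(D, C, P):
--     # Selection-based greedy: never sort. Repeatedly extract the
--     # lexicographically smallest remaining (distance, cost) pair in one
--     # linear pass and buy it while the budget allows.
--     items = list(zip(D, C))
--     count = 0
--     while items:
--         m, rest = items[0], []
--         for x in items[1:]:
--             if x < m:
--                 rest.append(m)
--                 m = x
--             else:
--                 rest.append(x)
--         if m[1] > P:
--             break
--         P -= m[1]
--         count += 1
--         items = rest
--     return count
-- ===== Notes on version B (the rewrite author's own statement) =====
-- stated objective: alternative
-- what changed: B never sorts: instead of A's sort-by-(distance,cost)-then-scan greedy, B runs a selection loop that repeatedly extracts the lexicographically smallest remaining (distance, cost) pair in one linear pass and buys it while the budget allows.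
import Mathlib
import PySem

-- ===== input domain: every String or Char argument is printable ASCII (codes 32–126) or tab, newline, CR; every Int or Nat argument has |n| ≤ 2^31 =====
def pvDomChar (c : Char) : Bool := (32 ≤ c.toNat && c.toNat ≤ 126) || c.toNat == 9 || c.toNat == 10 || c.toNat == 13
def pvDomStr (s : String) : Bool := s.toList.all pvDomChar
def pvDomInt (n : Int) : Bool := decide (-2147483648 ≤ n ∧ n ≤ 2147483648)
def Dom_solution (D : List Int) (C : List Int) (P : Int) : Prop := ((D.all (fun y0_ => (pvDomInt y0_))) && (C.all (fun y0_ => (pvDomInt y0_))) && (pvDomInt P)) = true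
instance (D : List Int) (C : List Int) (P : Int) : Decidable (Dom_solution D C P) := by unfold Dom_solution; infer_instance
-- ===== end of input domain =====

-- B replaces A's sort-then-scan greedy by a sort-free selection loop (repeated min-extraction); return values agree wherever A returns.

-- ===== PORT A =====
-- A's for-loop with early return: spend the budget greedily, stop at the first unaffordable monitor.
def solutionLoop : List (Int × Int) → Int → Int → Int
  | [], _, counter => counter
  | m :: rest, P, counter =>
      if m.2 ≤ P then solutionLoop rest (P - m.2) (counter + 1) else counter

def solution (D : List Int) (C : List Int) (P : Int) : Int :=
  -- monitors = [{'distance': D[i], 'monitor': C[i]} for i in range(len(D))]; indices in range under Pre_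
  -- sorted_monitors = sorted(monitors, key=lambda x: (x['distance'], x['monitor']))
  solutionLoop
    (PySem.List.sorted2
      ((PySem.List.pyRange 0 D.length 1).map
        (fun i => (PySem.List.pyGetD D i 0, PySem.List.pyGetD C i 0)))
      Prod.fst Prod.snd false)
    P 0

-- ===== PORT B =====
-- Python tuple comparison x < m on (distance, cost) pairs
def pyLt (a b : Int × Int) : Bool := decide (a.1 < b.1) || (a.1 == b.1 && decide (a.2 < b.2))

-- the inner for-loop of Source B: running minimum m, the other items appended to rest in order
def extractStep (s : (Int × Int) × List (Int × Int)) (x : Int × Int) : (Int × Int) × List (Int × Int) :=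
  if pyLt x s.1 then (x, s.2 ++ [s.1]) else (s.1, s.2 ++ [x])

def extractMin (x : Int × Int) (xs : List (Int × Int)) : (Int × Int) × List (Int × Int) :=
  xs.foldl extractStep (x, [])

theorem extractMin_length (x : Int × Int) (xs : List (Int × Int)) :
    (extractMin x xs).2.length = xs.length := by
  suffices h : ∀ (xs : List (Int × Int)) (m : Int × Int) (acc : List (Int × Int)),
      (xs.foldl extractStep (m, acc)).2.length = acc.length + xs.length by
    simpa using h xs x []
  intro xs
  induction xs with
  | nil => intro m acc; simp
  | cons y ys ih =>
      intro m acc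
      simp only [List.foldl_cons, extractStep]
      by_cases h : pyLt y m = true <;> simp [h, ih] <;> omega

-- the while-loop of Source B
def altLoop : List (Int × Int) → Int → Int → Int
  | [], _, count => count
  | x :: xs, P, count =>
      let r := extractMin x xs
      if P < r.1.2 then count
      else altLoop r.2 (P - r.1.2) (count + 1)
termination_by items => items.length
decreasing_by simp [extractMin_length]

def solution_alt (D : List Int) (C : List Int) (P : Int) : Int :=
  altLoop (D.zip C) P 0

-- ===== PRECONDITION & SPEC =====
-- A evaluates C[i] for every i < len(D): it raises IndexError when len(C) < len(D).
def Pre_solution (D : List Int) (C : List Int) (_P : Int) : Prop := D.length ≤ C.length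
instance (D : List Int) (C : List Int) (P : Int) : Decidable (Pre_solution D C P) := by unfold Pre_solution; infer_instance
def pvWitness_solution : List Int × List Int × Int := ([1, 3, 2], [5, 1, 2], 6)

def Spec_solution (D : List Int) (C : List Int) (P : Int) (out : Int) : Prop := out = solution_alt D C P
instance (D : List Int) (C : List Int) (P : Int) (out : Int) : Decidable (Spec_solution D C P out) := by unfold Spec_solution; infer_instance

-- ===== CLAIM (what is proved, stated in full; the proofs are below) =====
def Claim_equal_solution : Prop := ∀ (D : List Int) (C : List Int) (P : Int), Dom_solution D C P → Pre_solution D C P → Spec_solution D C P (solution D C P)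

-- ===== LEMMAS AND PROOFS =====

-- A's indexed comprehension is the zip, once every index is in range.
theorem monitors_eq_zip (D C : List Int) (h : D.length ≤ C.length) :
    (PySem.List.pyRange 0 (D.length : Int) 1).map
      (fun i => (PySem.List.pyGetD D i 0, PySem.List.pyGetD C i 0)) = D.zip C := by
  apply List.ext_getElem
  · simp [PySem.List.length_pyRange_one]
    omega
  · intro k h1 h2
    simp only [List.getElem_map, PySem.List.getElem_pyRange_one, List.getElem_zip]
    have hk : k < D.length := by simpa [PySem.List.length_pyRange_one] using h1
    have hk' : k < C.length := by omega
    have h0 : (0 : Int) + (k : Int) = (k : Int) := by ring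
    rw [h0]
    simp [PySem.List.pyGetD_natCast, hk, hk']

-- the lexicographic sort key (Python's tuple key (distance, cost))
def keyL (p : Int × Int) : Lex (Int × Int) := toLex p

theorem pyLt_iff (a b : Int × Int) : pyLt a b = true ↔ keyL a < keyL b := by
  simp [pyLt, keyL, Prod.Lex.lt_iff]

-- A's tuple-key sort is the plain sort under the lexicographic key.
theorem before_eq :
    (fun (a b : Int × Int) => decide (a.1 < b.1) || (!decide (b.1 < a.1) && decide (a.2 < b.2)))
      = (fun (a b : Int × Int) => decide (keyL a < keyL b)) := by
  funext a b
  simp only [keyL, Prod.Lex.lt_iff]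
  by_cases h1 : a.1 < b.1 <;> by_cases h2 : b.1 < a.1 <;> by_cases h3 : a.2 < b.2 <;>
    simp [h1, h2, h3] <;> omega

theorem sorted2_eq_sorted (xs : List (Int × Int)) :
    PySem.List.sorted2 xs Prod.fst Prod.snd false = PySem.List.sorted xs keyL false := by
  simp only [PySem.List.sorted2, PySem.List.sorted, Bool.false_eq_true, if_false]
  rw [before_eq]

-- the sorted list is the unique key-sorted permutation
theorem sorted_unique (l ys : List (Int × Int)) (hp : ys.Perm l)
    (hs : ys.Pairwise (fun a b => keyL a ≤ keyL b)) :
    PySem.List.sorted l keyL false = ys := by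
  refine List.Perm.eq_of_pairwise ?_ (PySem.List.sorted_pairwise l keyL) hs
    ((PySem.List.sorted_perm l keyL false).trans hp.symm)
  intro a b _ _ hab hba
  exact toLex.injective (le_antisymm hab hba)

-- extracting the minimum splits the sorted list at its head
theorem sorted_cons_min (l : List (Int × Int)) (m : Int × Int) (rest : List (Int × Int))
    (hperm : (m :: rest).Perm l) (hmin : ∀ y ∈ l, keyL m ≤ keyL y) :
    PySem.List.sorted l keyL false = m :: PySem.List.sorted rest keyL false := by
  apply sorted_unique
  · exact ((PySem.List.sorted_perm rest keyL false).cons m).trans hperm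
  · refine List.Pairwise.cons ?_ (PySem.List.sorted_pairwise rest keyL)
    intro y hy
    have hy' : y ∈ rest := (PySem.List.sorted_perm rest keyL false).mem_iff.mp hy
    exact hmin y (hperm.mem_iff.mp (List.mem_cons_of_mem m hy'))

-- pulling an element out of the middle, pushing another in
theorem swap_mid (a b : Int × Int) (l1 l2 : List (Int × Int)) :
    (a :: (l1 ++ [b] ++ l2)).Perm (b :: (l1 ++ a :: l2)) := by
  have h1 : (l1 ++ [b] ++ l2).Perm (b :: (l1 ++ l2)) := by
    simp
  have h2 : (l1 ++ a :: l2).Perm (a :: (l1 ++ l2)) := List.perm_middle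
  exact ((h1.cons a).trans (List.Perm.swap b a (l1 ++ l2))).trans (h2.cons b).symm

-- the inner pass of Source B: its result is a permutation of the input and its first component is minimal
theorem extractMin_go (xs : List (Int × Int)) :
    ∀ (m : Int × Int) (acc : List (Int × Int)), (∀ y ∈ acc, keyL m ≤ keyL y) →
      ((xs.foldl extractStep (m, acc)).1 :: (xs.foldl extractStep (m, acc)).2).Perm
          (m :: (acc ++ xs)) ∧
        (∀ y ∈ (xs.foldl extractStep (m, acc)).1 :: (xs.foldl extractStep (m, acc)).2,
          keyL (xs.foldl extractStep (m, acc)).1 ≤ keyL y) := by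
  induction xs with
  | nil =>
      intro m acc hacc
      refine ⟨by simp, ?_⟩
      intro y hy
      simp only [List.foldl_nil] at hy ⊢
      rcases List.mem_cons.mp hy with h | h
      · exact le_of_eq (congrArg keyL h.symm)
      · exact hacc y h
  | cons z zs ih =>
      intro m acc hacc
      simp only [List.foldl_cons, extractStep]
      by_cases hz : pyLt z m = true
      · have hzm : keyL z < keyL m := (pyLt_iff z m).mp hz
        have hacc' : ∀ y ∈ acc ++ [m], keyL z ≤ keyL y := by
          intro y hy
          rcases List.mem_append.mp hy with h | h
          · exact le_of_lt (lt_of_lt_of_le hzm (hacc y h))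
          · simp only [List.mem_singleton] at h
            exact le_of_lt (h ▸ hzm)
        obtain ⟨hp, hm⟩ := ih z (acc ++ [m]) hacc'
        refine ⟨?_, by simpa [hz] using hm⟩
        have hstep : (z :: (acc ++ [m] ++ zs)).Perm (m :: (acc ++ z :: zs)) :=
          swap_mid z m acc zs
        simpa [hz] using hp.trans hstep
      · have hzm : keyL m ≤ keyL z :=
          not_lt.mp (fun h => hz ((pyLt_iff z m).mpr h))
        have hacc' : ∀ y ∈ acc ++ [z], keyL m ≤ keyL y := by
          intro y hy
          rcases List.mem_append.mp hy with h | h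
          · exact hacc y h
          · simp only [List.mem_singleton] at h
            exact h ▸ hzm
        obtain ⟨hp, hm⟩ := ih m (acc ++ [z]) hacc'
        refine ⟨?_, by simp [hz] at hm ⊢; exact hm⟩
        have hstep : (m :: (acc ++ [z] ++ zs)).Perm (m :: (acc ++ z :: zs)) := by
          simp
        simpa [hz] using hp.trans hstep

theorem extractMin_spec (x : Int × Int) (xs : List (Int × Int)) :
    ((extractMin x xs).1 :: (extractMin x xs).2).Perm (x :: xs) ∧
      (∀ y ∈ x :: xs, keyL (extractMin x xs).1 ≤ keyL y) := by
  have h := extractMin_go xs x [] (by simp)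
  unfold extractMin
  refine ⟨by simpa using h.1, ?_⟩
  intro y hy
  have hy2 : y ∈ (xs.foldl extractStep (x, [])).1 :: (xs.foldl extractStep (x, [])).2 :=
    h.1.mem_iff.mpr (by simpa using hy)
  exact h.2 y hy2

-- the selection loop of B computes A's scan of the sorted list
theorem loop_eq_alt_aux (n : Nat) : ∀ (l : List (Int × Int)) (P cnt : Int), l.length ≤ n →
    solutionLoop (PySem.List.sorted l keyL false) P cnt = altLoop l P cnt := by
  induction n with
  | zero =>
      intro l P cnt hl
      have : l = [] := List.eq_nil_of_length_eq_zero (Nat.le_zero.mp hl)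
      subst this
      simp [PySem.List.sorted, solutionLoop, altLoop]
  | succ n ih =>
      intro l P cnt hl
      match l with
      | [] => simp [PySem.List.sorted, solutionLoop, altLoop]
      | x :: xs =>
        obtain ⟨hperm, hmin⟩ := extractMin_spec x xs
        rw [sorted_cons_min (x :: xs) (extractMin x xs).1 (extractMin x xs).2 hperm hmin]
        rw [altLoop]
        simp only [solutionLoop]
        by_cases h : (extractMin x xs).1.2 ≤ P
        · rw [if_pos h, if_neg (not_lt.mpr h)]
          apply ih
          rw [extractMin_length]
          simpa using Nat.le_of_succ_le_succ (by simpa using hl)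
        · rw [if_neg h, if_pos (lt_of_not_ge h)]

theorem loop_eq_alt (l : List (Int × Int)) (P cnt : Int) :
    solutionLoop (PySem.List.sorted l keyL false) P cnt = altLoop l P cnt :=
  loop_eq_alt_aux l.length l P cnt le_rfl

-- ===== VERDICT (by name: the statement is the Claim_ definition above) =====
theorem solution_spec : Claim_equal_solution := by
  intro D C P _ hpre
  unfold Spec_solution solution solution_alt
  rw [monitors_eq_zip D C hpre, sorted2_eq_sorted, loop_eq_alt]
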